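-- pv_equiv track=rewrite | github.com/DavidAcosta-dev/RE-TeamBuddies | scripts/find_cdstream_neighbors.py | bfs_neighbors
-- ===== SOURCE A (Python) =====
-- from collections import defaultdict, deque, Counter
--
-- def bfs_neighbors(graph_out, graph_in, seeds, max_depth=3, same_binary=True):
--     dist = {}
--     q = deque()
--     for s in seeds:
--         dist[s] = 0
--         q.append(s)
--     while q:
--         cur = q.popleft()
--         d = dist[cur]
--         if d >= max_depth:
--             continue
--         cur_bin, _ = cur
--         for nxt in graph_out.get(cur, ()):  # downstream
--             if same_binary and nxt[0] != cur_bin: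
--                 continue
--             if nxt not in dist:
--                 dist[nxt] = d + 1
--                 q.append(nxt)
--         for prv in graph_in.get(cur, ()):  # upstream
--             if same_binary and prv[0] != cur_bin:
--                 continue
--             if prv not in dist:
--                 dist[prv] = d + 1
--                 q.append(prv)
--     return dist
-- ===== SOURCE B (Python) =====
-- def bfs_neighbors(graph_out, graph_in, seeds, max_depth=3, same_binary=True):
--     # No queue and no carried frontier: the distance map itself is the only state.
--     # Round d re-derives the active level by scanning dist for nodes at distance d,
--     # then relaxes their edges, writing d+1 for unseen targets.
--     dist = {}
--     for s in seeds:
--         dist[s] = 0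
--     for d in range(max_depth):
--         active = [node for node, dd in dist.items() if dd == d]
--         if not active:
--             break
--         for cur in active:
--             cur_bin = cur[0]
--             for nxt in list(graph_out.get(cur, ())) + list(graph_in.get(cur, ())):
--                 if (not same_binary or nxt[0] == cur_bin) and nxt not in dist:
--                     dist[nxt] = d + 1
--     return dist
-- ===== Notes on version B (the rewrite author's own statement) =====
-- stated objective: alternative
-- what changed: Removed the BFS queue entirely: no deque and no frontier list is maintained between steps; instead each round d re-derives the active level by scanning the accumulated distance map for nodes whose distance equals d and relaxes their edges, so the only state carried across rounds is the distance dict itself.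
import Mathlib
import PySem

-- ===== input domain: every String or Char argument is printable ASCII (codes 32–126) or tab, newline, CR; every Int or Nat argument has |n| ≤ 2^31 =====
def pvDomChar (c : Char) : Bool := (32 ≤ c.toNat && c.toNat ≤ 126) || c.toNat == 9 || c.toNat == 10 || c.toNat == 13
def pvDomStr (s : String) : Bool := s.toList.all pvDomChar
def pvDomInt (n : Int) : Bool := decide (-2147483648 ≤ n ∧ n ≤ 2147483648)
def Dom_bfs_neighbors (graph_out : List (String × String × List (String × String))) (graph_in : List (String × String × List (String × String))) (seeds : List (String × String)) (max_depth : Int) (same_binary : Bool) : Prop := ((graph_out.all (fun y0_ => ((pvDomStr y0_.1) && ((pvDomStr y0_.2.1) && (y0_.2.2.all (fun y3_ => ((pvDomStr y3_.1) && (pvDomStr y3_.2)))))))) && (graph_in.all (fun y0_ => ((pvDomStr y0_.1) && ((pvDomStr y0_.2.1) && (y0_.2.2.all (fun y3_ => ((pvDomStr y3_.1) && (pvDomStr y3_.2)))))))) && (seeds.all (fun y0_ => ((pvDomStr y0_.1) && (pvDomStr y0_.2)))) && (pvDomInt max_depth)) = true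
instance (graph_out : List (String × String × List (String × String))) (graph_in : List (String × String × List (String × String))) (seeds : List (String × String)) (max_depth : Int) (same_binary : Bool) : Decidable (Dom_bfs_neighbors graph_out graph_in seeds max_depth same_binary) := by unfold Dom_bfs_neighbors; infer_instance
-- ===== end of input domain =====

-- B removes A's BFS queue entirely: no worklist is carried — each round re-derives the active
-- level by scanning the accumulated distance map; objective: alternative, same results.

-- ===== PORT A =====
-- shared input decoding: the flattened triple list IS the Python dict; lookup via PySem.Dict (last write wins, as in dict construction)
def pvDget (g : List (String × String × List (String × String))) (k : String × String) :
    List (String × String) :=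
  (PySem.Dict.ofList (g.map (fun e => ((e.1, e.2.1), e.2.2)))).getD k []

-- A's inner `for nxt in …` loop over one adjacency list, threading (dist, queue)
def pvScan (sb : Bool) (cb : String) (d : Int)
    (st : PySem.Dict (String × String) Int × List (String × String)) :
    List (String × String) → PySem.Dict (String × String) Int × List (String × String)
  | [] => st
  | nxt :: rest =>
    if sb ∧ nxt.1 ≠ cb then pvScan sb cb d st rest
    else if st.1.contains nxt then pvScan sb cb d st rest
    else pvScan sb cb d (st.1.insert nxt (d + 1), st.2 ++ [nxt]) rest

-- one dequeued node's expansion: downstream scan then upstream scan (exactly A's two inner loops)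
def pvVisit (gout gin : List (String × String × List (String × String))) (sb : Bool)
    (D : PySem.Dict (String × String) Int) (rest : List (String × String))
    (cur : String × String) (d : Int) :
    PySem.Dict (String × String) Int × List (String × String) :=
  pvScan sb cur.1 d (pvScan sb cur.1 d (D, rest) (pvDget gout cur)) (pvDget gin cur)

-- loop bound for A's while-loop: each iteration pops one node; pops ≤ queue + twice the newly
-- discoverable targets, so this measure bounds the number of steps (proved below: pvLoopAF_congr)
def pvTargets (g : List (String × String × List (String × String))) : List (String × String) :=
  g.flatMap (fun e => e.2.2)

def pvMissing (U : List (String × String)) (D : PySem.Dict (String × String) Int) : Nat :=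
  (U.filter (fun x => !D.contains x)).length

-- A's while-loop over the deque (head = popleft); dist[cur] is always a key, so getD's default
-- is never used; the Nat argument is a step-count bound (never exhausted, see pvLoopAF_congr),
-- a totality guard only — the computation is A's loop step for step
def pvLoopAF (gout gin : List (String × String × List (String × String))) (maxd : Int) (sb : Bool) :
    Nat → PySem.Dict (String × String) Int → List (String × String) →
      PySem.Dict (String × String) Int
  | _, D, [] => D
  | 0, D, _ :: _ => D
  | fuel + 1, D, cur :: rest =>
    if maxd ≤ (D.get? cur).getD 0 then pvLoopAF gout gin maxd sb fuel D rest
    else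
      pvLoopAF gout gin maxd sb fuel (pvVisit gout gin sb D rest cur ((D.get? cur).getD 0)).1
        (pvVisit gout gin sb D rest cur ((D.get? cur).getD 0)).2

def pvLoopA (gout gin : List (String × String × List (String × String))) (maxd : Int) (sb : Bool)
    (D : PySem.Dict (String × String) Int) (q : List (String × String)) :
    PySem.Dict (String × String) Int :=
  pvLoopAF gout gin maxd sb (2 * pvMissing (pvTargets gout ++ pvTargets gin) D + q.length) D q

def bfs_neighbors (graph_out : List (String × String × List (String × String))) (graph_in : List (String × String × List (String × String))) (seeds : List (String × String)) (max_depth : Int) (same_binary : Bool) : List (String × String × Int) :=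
  let init := seeds.foldl (fun st s => (st.1.insert s 0, st.2 ++ [s]))
    ((PySem.Dict.empty : PySem.Dict (String × String) Int), ([] : List (String × String)))
  (pvLoopA graph_out graph_in max_depth same_binary init.1 init.2).items.map
    (fun p => (p.1.1, p.1.2, p.2))

-- ===== PORT B =====
-- B's inner `for nxt in out+in` loop: the accumulator is the distance dict alone (no list)
def pvRelax (sb : Bool) (cb : String) (d : Int)
    (dist : PySem.Dict (String × String) Int) (lst : List (String × String)) :
    PySem.Dict (String × String) Int :=
  lst.foldl (fun dist nxt =>
    if (!sb || nxt.1 == cb) && !dist.contains nxt then dist.insert nxt (d + 1) else dist) dist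

-- `for cur in active`: relax cur's concatenated neighbourhood
def pvRoundStep (gout gin : List (String × String × List (String × String))) (sb : Bool)
    (d : Int) (dist : PySem.Dict (String × String) Int) (cur : String × String) :
    PySem.Dict (String × String) Int :=
  pvRelax sb cur.1 d dist (pvDget gout cur ++ pvDget gin cur)

-- `for d in range(max_depth)` with early break: each round re-derives the active level from
-- the dict itself; the Nat counts the remaining rounds, the Int is the current depth d
def pvRounds (gout gin : List (String × String × List (String × String))) (sb : Bool) :
    Nat → Int → PySem.Dict (String × String) Int → PySem.Dict (String × String) Int
  | 0, _, dist => dist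
  | n + 1, d, dist =>
    let active := (dist.items.filter (fun p => p.2 == d)).map (·.1)
    if active.isEmpty then dist
    else pvRounds gout gin sb n (d + 1) (active.foldl (pvRoundStep gout gin sb d) dist)

def bfs_neighbors_alt (graph_out : List (String × String × List (String × String))) (graph_in : List (String × String × List (String × String))) (seeds : List (String × String)) (max_depth : Int) (same_binary : Bool) : List (String × String × Int) :=
  let dist0 := seeds.foldl (fun dist s => dist.insert s 0)
    (PySem.Dict.empty : PySem.Dict (String × String) Int)
  (pvRounds graph_out graph_in same_binary max_depth.toNat 0 dist0).items.map
    (fun p => (p.1.1, p.1.2, p.2))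

-- ===== PRECONDITION & SPEC =====
def Spec_bfs_neighbors (graph_out : List (String × String × List (String × String))) (graph_in : List (String × String × List (String × String))) (seeds : List (String × String)) (max_depth : Int) (same_binary : Bool) (out : List (String × String × Int)) : Prop := out = bfs_neighbors_alt graph_out graph_in seeds max_depth same_binary
instance (graph_out : List (String × String × List (String × String))) (graph_in : List (String × String × List (String × String))) (seeds : List (String × String)) (max_depth : Int) (same_binary : Bool) (out : List (String × String × Int)) : Decidable (Spec_bfs_neighbors graph_out graph_in seeds max_depth same_binary out) := by unfold Spec_bfs_neighbors; infer_instance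

-- ===== CLAIM (what is proved, stated in full; the proofs are below) =====
def Claim_equal_bfs_neighbors : Prop := ∀ (graph_out : List (String × String × List (String × String))) (graph_in : List (String × String × List (String × String))) (seeds : List (String × String)) (max_depth : Int) (same_binary : Bool), Dom_bfs_neighbors graph_out graph_in seeds max_depth same_binary → Spec_bfs_neighbors graph_out graph_in seeds max_depth same_binary (bfs_neighbors graph_out graph_in seeds max_depth same_binary)

-- ===== LEMMAS AND PROOFS =====

-- ---- proof-internal middle form: a level-synchronous BFS carrying (dist, frontier) ----
def pvFoldNbrs (sb : Bool) (cb : String) (depth : Int) (lst : List (String × String))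
    (st : PySem.Dict (String × String) Int × List (String × String)) :
    PySem.Dict (String × String) Int × List (String × String) :=
  lst.foldl (fun st nxt =>
    if sb ∧ nxt.1 ≠ cb then st
    else if st.1.contains nxt then st
    else (st.1.insert nxt (depth + 1), st.2 ++ [nxt])) st

def pvLevelStep (gout gin : List (String × String × List (String × String))) (sb : Bool)
    (depth : Int) (st : PySem.Dict (String × String) Int × List (String × String))
    (cur : String × String) :
    PySem.Dict (String × String) Int × List (String × String) :=
  pvFoldNbrs sb cur.1 depth (pvDget gout cur ++ pvDget gin cur) st

def pvLevels (gout gin : List (String × String × List (String × String))) (sb : Bool) :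
    Nat → Int → PySem.Dict (String × String) Int → List (String × String) →
      PySem.Dict (String × String) Int
  | 0, _, dist, _ => dist
  | n + 1, depth, dist, frontier =>
    if frontier.isEmpty then dist
    else
      let st := frontier.foldl (pvLevelStep gout gin sb depth) (dist, [])
      pvLevels gout gin sb n (depth + 1) st.1 st.2

-- ---- part 1: A's queue BFS equals the middle form ----
lemma pvFilter_len_le {α : Type} (p q : α → Bool) (l : List α)
    (h : ∀ x, q x = true → p x = true) :
    (l.filter q).length ≤ (l.filter p).length := by
  induction l with
  | nil => simp
  | cons a t ih =>
    by_cases hq : q a = true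
    · simp [hq, h a hq]; omega
    · by_cases hp : p a = true <;> simp [hq, hp] <;> omega

lemma pvFilter_len_lt {α : Type} (p q : α → Bool) (l : List α)
    (h : ∀ x, q x = true → p x = true) (x : α) (hx : x ∈ l)
    (hq : q x = false) (hp : p x = true) :
    (l.filter q).length < (l.filter p).length := by
  induction l with
  | nil => cases hx
  | cons a t ih =>
    rcases List.mem_cons.mp hx with rfl | hx'
    · have hle := pvFilter_len_le p q t h
      simp [hq, hp]
      omega
    · by_cases hqa : q a = true
      · simp [hqa, h a hqa]; exact ih hx'
      · by_cases hpa : p a = true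
        · simp [hqa, hpa]; exact Nat.le_of_lt (ih hx')
        · simp [hqa, hpa]; exact ih hx'

lemma pvMissing_insert_lt (U : List (String × String)) (D : PySem.Dict (String × String) Int)
    (k : String × String) (v : Int) (hU : k ∈ U) (hD : D.contains k = false) :
    pvMissing U (D.insert k v) < pvMissing U D := by
  apply pvFilter_len_lt (fun x => !D.contains x) (fun x => !(D.insert k v).contains x) U _ k hU
  · simp [PySem.Dict.contains_insert_self]
  · simp [hD]
  · intro x hx
    simp only [Bool.not_eq_true'] at hx ⊢
    rw [PySem.Dict.contains_insert] at hx
    exact (Bool.or_eq_false_iff.mp hx).2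

lemma pvScan_measure (U : List (String × String)) (sb : Bool) (cb : String) (d : Int) :
    ∀ (lst : List (String × String)) st, (∀ x ∈ lst, x ∈ U) →
      2 * pvMissing U (pvScan sb cb d st lst).1 + (pvScan sb cb d st lst).2.length
        ≤ 2 * pvMissing U st.1 + st.2.length := by
  intro lst
  induction lst with
  | nil => intro st h; simp [pvScan]
  | cons nxt rest ih =>
    intro st h
    have hrest : ∀ x ∈ rest, x ∈ U := fun x hx => h x (List.mem_cons_of_mem _ hx)
    by_cases h1 : sb ∧ nxt.1 ≠ cb
    · simpa [pvScan, h1] using ih st hrest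
    · by_cases h2 : st.1.contains nxt = true
      · simpa [pvScan, h1, h2] using ih st hrest
      · have hlt := pvMissing_insert_lt U st.1 nxt (d + 1) (h nxt (List.mem_cons_self ..))
          (by simpa using h2)
        have hih := ih (st.1.insert nxt (d + 1), st.2 ++ [nxt]) hrest
        simp only [List.length_append, List.length_cons, List.length_nil] at hih
        simp only [pvScan]
        rw [if_neg h1, if_neg h2]
        omega

lemma pvMem_items_foldl_insert (ps : List ((String × String) × List (String × String))) :
    ∀ (d : PySem.Dict (String × String) (List (String × String))) (p : (String × String) × List (String × String)),
      p ∈ (ps.foldl (fun acc q => acc.insert q.1 q.2) d).items →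
      p ∈ d.items ∨ p.2 ∈ ps.map (·.2) := by
  induction ps with
  | nil => intro d p h; exact Or.inl (by simpa using h)
  | cons q ps ih =>
    intro d p h
    rcases ih (d.insert q.1 q.2) p (by simpa [List.foldl_cons] using h) with h1 | h1
    · rcases (PySem.Dict.mem_items_insert ..).mp h1 with rfl | ⟨h2, _⟩
      · right; simp
      · exact Or.inl h2
    · right; simp only [List.map_cons, List.mem_cons]; exact Or.inr h1

lemma pvDget_mem (g : List (String × String × List (String × String))) (k : String × String) :
    ∀ x ∈ pvDget g k, x ∈ pvTargets g := by
  intro x hx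
  unfold pvDget at hx
  rw [PySem.Dict.getD_eq_get?_getD] at hx
  cases hget : (PySem.Dict.ofList (g.map (fun e => ((e.1, e.2.1), e.2.2)))).get? k with
  | none => rw [hget] at hx; simp at hx
  | some vs =>
    rw [hget] at hx
    simp only [Option.getD_some] at hx
    have hmem := PySem.Dict.mem_items_of_get?_eq_some _ hget
    have hfold := pvMem_items_foldl_insert (g.map (fun e => ((e.1, e.2.1), e.2.2)))
      PySem.Dict.empty (k, vs)
      (by simpa [PySem.Dict.ofList, PySem.Dict.update] using hmem)
    rcases hfold with h | h
    · simp [PySem.Dict.empty] at h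
    · simp only [List.map_map] at h
      obtain ⟨e, he, heq⟩ := List.mem_map.mp h
      unfold pvTargets
      exact List.mem_flatMap.mpr ⟨e, he, by rw [show e.2.2 = vs from heq]; exact hx⟩

lemma pvVisit_measure (gout gin : List (String × String × List (String × String))) (sb : Bool)
    (D : PySem.Dict (String × String) Int) (rest : List (String × String))
    (cur : String × String) (d : Int) :
    2 * pvMissing (pvTargets gout ++ pvTargets gin) (pvVisit gout gin sb D rest cur d).1
        + (pvVisit gout gin sb D rest cur d).2.length
      ≤ 2 * pvMissing (pvTargets gout ++ pvTargets gin) D + rest.length := by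
  have hout : ∀ x ∈ pvDget gout cur, x ∈ pvTargets gout ++ pvTargets gin := by
    intro x hx; exact List.mem_append_left _ (pvDget_mem gout cur x hx)
  have hin : ∀ x ∈ pvDget gin cur, x ∈ pvTargets gout ++ pvTargets gin := by
    intro x hx; exact List.mem_append_right _ (pvDget_mem gin cur x hx)
  have h1 := pvScan_measure (pvTargets gout ++ pvTargets gin) sb cur.1 d (pvDget gout cur) (D, rest) hout
  have h2 := pvScan_measure (pvTargets gout ++ pvTargets gin) sb cur.1 d (pvDget gin cur)
      (pvScan sb cur.1 d (D, rest) (pvDget gout cur)) hin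
  simp only [pvVisit]
  simp at h1
  omega

lemma pvLoopAF_nil (gout gin : List (String × String × List (String × String))) (maxd : Int)
    (sb : Bool) (fuel : Nat) (D : PySem.Dict (String × String) Int) :
    pvLoopAF gout gin maxd sb fuel D [] = D := by
  cases fuel <;> rfl

-- the fuel is a totality guard only: any two sufficient fuels give the same run
lemma pvLoopAF_congr (gout gin : List (String × String × List (String × String))) (maxd : Int)
    (sb : Bool) :
    ∀ (fuel fuel' : Nat) (D : PySem.Dict (String × String) Int) (q : List (String × String)),
      2 * pvMissing (pvTargets gout ++ pvTargets gin) D + q.length ≤ fuel →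
      2 * pvMissing (pvTargets gout ++ pvTargets gin) D + q.length ≤ fuel' →
      pvLoopAF gout gin maxd sb fuel D q = pvLoopAF gout gin maxd sb fuel' D q := by
  intro fuel
  induction fuel with
  | zero =>
    intro fuel' D q h _
    have hq : q = [] := List.eq_nil_of_length_eq_zero (by omega)
    subst hq
    rw [pvLoopAF_nil, pvLoopAF_nil]
  | succ n ih =>
    intro fuel' D q h h'
    cases q with
    | nil => rw [pvLoopAF_nil, pvLoopAF_nil]
    | cons cur rest =>
      cases fuel' with
      | zero => exfalso; simp only [List.length_cons] at h'; omega
      | succ m =>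
        simp only [pvLoopAF]
        simp only [List.length_cons] at h h'
        by_cases hc : maxd ≤ (D.get? cur).getD 0
        · rw [if_pos hc, if_pos hc]
          exact ih m D rest (by omega) (by omega)
        · rw [if_neg hc, if_neg hc]
          have hv := pvVisit_measure gout gin sb D rest cur ((D.get? cur).getD 0)
          exact ih m _ _ (by omega) (by omega)

lemma pvLoopA_nil (gout gin : List (String × String × List (String × String))) (maxd : Int)
    (sb : Bool) (D : PySem.Dict (String × String) Int) :
    pvLoopA gout gin maxd sb D [] = D := by
  unfold pvLoopA
  exact pvLoopAF_nil ..

lemma pvLoopA_cons (gout gin : List (String × String × List (String × String))) (maxd : Int)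
    (sb : Bool) (D : PySem.Dict (String × String) Int) (cur : String × String)
    (rest : List (String × String)) :
    pvLoopA gout gin maxd sb D (cur :: rest)
      = if maxd ≤ (D.get? cur).getD 0 then pvLoopA gout gin maxd sb D rest
        else pvLoopA gout gin maxd sb (pvVisit gout gin sb D rest cur ((D.get? cur).getD 0)).1
          (pvVisit gout gin sb D rest cur ((D.get? cur).getD 0)).2 := by
  unfold pvLoopA
  have hlen : 2 * pvMissing (pvTargets gout ++ pvTargets gin) D + (cur :: rest).length
      = (2 * pvMissing (pvTargets gout ++ pvTargets gin) D + rest.length) + 1 := by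
    simp only [List.length_cons]
    omega
  rw [hlen]
  simp only [pvLoopAF]
  by_cases hc : maxd ≤ (D.get? cur).getD 0
  · rw [if_pos hc, if_pos hc]
  · rw [if_neg hc, if_neg hc]
    have hv := pvVisit_measure gout gin sb D rest cur ((D.get? cur).getD 0)
    exact pvLoopAF_congr gout gin maxd sb _ _ _ _ (by omega) (by omega)

-- generic: a fold whose step only appends to the second (list) component, independently of it
lemma pvFoldl_snd_append {A B C : Type} (step : A × List B → C → A × List B)
    (hstep : ∀ a q c, step (a, q) c = ((step (a, []) c).1, q ++ (step (a, []) c).2)) :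
    ∀ (F : List C) (a : A) (q : List B),
      F.foldl step (a, q) = ((F.foldl step (a, [])).1, q ++ (F.foldl step (a, [])).2) := by
  intro F
  induction F with
  | nil => intro a q; simp
  | cons c F ih =>
    intro a q
    simp only [List.foldl_cons]
    rw [hstep a q c, hstep a [] c]
    simp only [List.nil_append]
    rw [ih (step (a, []) c).1 (q ++ (step (a, []) c).2)]
    conv_rhs => rw [show step (a, []) c = ((step (a, []) c).1, (step (a, []) c).2) from rfl,
      ih (step (a, []) c).1 (step (a, []) c).2]
    simp [List.append_assoc]

lemma pvFoldNbrs_eq_scan (sb : Bool) (cb : String) (d : Int) :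
    ∀ (lst : List (String × String)) st, pvFoldNbrs sb cb d lst st = pvScan sb cb d st lst := by
  intro lst
  induction lst with
  | nil => intro st; rfl
  | cons nxt rest ih =>
    intro st
    by_cases h1 : sb ∧ nxt.1 ≠ cb
    · simp only [pvFoldNbrs, List.foldl_cons, if_pos h1, pvScan]
      exact ih st
    · by_cases h2 : st.1.contains nxt = true
      · simp only [pvFoldNbrs, List.foldl_cons, if_neg h1, if_pos h2, pvScan]
        exact ih st
      · simp only [pvFoldNbrs, List.foldl_cons, if_neg h1, if_neg h2, pvScan]
        exact ih _

lemma pvScan_append (sb : Bool) (cb : String) (d : Int) :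
    ∀ (l1 l2 : List (String × String)) st,
      pvScan sb cb d st (l1 ++ l2) = pvScan sb cb d (pvScan sb cb d st l1) l2 := by
  intro l1
  induction l1 with
  | nil => intro l2 st; rfl
  | cons nxt rest ih =>
    intro l2 st
    by_cases h1 : sb ∧ nxt.1 ≠ cb
    · simp only [List.cons_append, pvScan, if_pos h1]; exact ih l2 st
    · by_cases h2 : st.1.contains nxt = true
      · simp only [List.cons_append, pvScan, if_neg h1, if_pos h2]; exact ih l2 st
      · simp only [List.cons_append, pvScan, if_neg h1, if_neg h2]; exact ih l2 _

lemma pvStep_eq (gout gin : List (String × String × List (String × String))) (sb : Bool)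
    (d : Int) (D : PySem.Dict (String × String) Int) (q : List (String × String))
    (cur : String × String) :
    pvLevelStep gout gin sb d (D, q) cur = pvVisit gout gin sb D q cur d := by
  rw [pvLevelStep, pvFoldNbrs_eq_scan, pvScan_append, pvVisit]

lemma pvScan_snd (sb : Bool) (cb : String) (d : Int) :
    ∀ (lst : List (String × String)) (D : PySem.Dict (String × String) Int)
      (q : List (String × String)),
      pvScan sb cb d (D, q) lst
        = ((pvScan sb cb d (D, []) lst).1, q ++ (pvScan sb cb d (D, []) lst).2) := by
  intro lst
  induction lst with
  | nil => intro D q; simp [pvScan]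
  | cons nxt rest ih =>
    intro D q
    by_cases h1 : sb ∧ nxt.1 ≠ cb
    · simp only [pvScan, if_pos h1]; exact ih D q
    · by_cases h2 : D.contains nxt = true
      · simp only [pvScan, if_neg h1, if_pos h2]; exact ih D q
      · simp only [pvScan, if_neg h1, if_neg h2]
        rw [ih (D.insert nxt (d + 1)) (q ++ [nxt]), ih (D.insert nxt (d + 1)) ([] ++ [nxt])]
        simp [List.append_assoc]

lemma pvScan_get?_mono (sb : Bool) (cb : String) (d : Int) :
    ∀ (lst : List (String × String)) (st : PySem.Dict (String × String) Int × List (String × String))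
      (x : String × String) (v : Int),
      st.1.get? x = some v → (pvScan sb cb d st lst).1.get? x = some v := by
  intro lst
  induction lst with
  | nil => intro st x v h; simpa [pvScan] using h
  | cons nxt rest ih =>
    intro st x v h
    by_cases h1 : sb ∧ nxt.1 ≠ cb
    · simp only [pvScan, if_pos h1]; exact ih st x v h
    · by_cases h2 : st.1.contains nxt = true
      · simp only [pvScan, if_neg h1, if_pos h2]; exact ih st x v h
      · simp only [pvScan, if_neg h1, if_neg h2]
        apply ih _ x v
        have hne : x ≠ nxt := by
          rintro rfl
          rw [PySem.Dict.contains_eq_isSome_get?, h] at h2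
          exact h2 rfl
        simpa [PySem.Dict.get?_insert_of_ne st.1 (d + 1) hne] using h

lemma pvScan_inv (sb : Bool) (cb : String) (d : Int) :
    ∀ (lst : List (String × String)) (st : PySem.Dict (String × String) Int × List (String × String)),
      (∀ x ∈ st.2, st.1.get? x = some (d + 1)) →
      ∀ x ∈ (pvScan sb cb d st lst).2, (pvScan sb cb d st lst).1.get? x = some (d + 1) := by
  intro lst
  induction lst with
  | nil => intro st h; simpa [pvScan] using h
  | cons nxt rest ih =>
    intro st h
    by_cases h1 : sb ∧ nxt.1 ≠ cb
    · simp only [pvScan, if_pos h1]; exact ih st h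
    · by_cases h2 : st.1.contains nxt = true
      · simp only [pvScan, if_neg h1, if_pos h2]; exact ih st h
      · simp only [pvScan, if_neg h1, if_neg h2]
        apply ih
        intro x hx
        rcases List.mem_append.mp hx with hx' | hx'
        · have hne : x ≠ nxt := by
            rintro rfl
            rw [PySem.Dict.contains_eq_isSome_get?, h x hx'] at h2
            exact h2 rfl
          simpa [PySem.Dict.get?_insert_of_ne st.1 (d + 1) hne] using h x hx'
        · have : x = nxt := by simpa using hx'
          subst this
          exact PySem.Dict.get?_insert_self st.1 x (d + 1)

lemma pvStep_snd (gout gin : List (String × String × List (String × String))) (sb : Bool)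
    (d : Int) (D : PySem.Dict (String × String) Int) (q : List (String × String))
    (cur : String × String) :
    pvLevelStep gout gin sb d (D, q) cur
      = ((pvLevelStep gout gin sb d (D, []) cur).1,
          q ++ (pvLevelStep gout gin sb d (D, []) cur).2) := by
  rw [pvStep_eq, pvStep_eq]
  simp only [pvVisit]
  rcases hsc : pvScan sb cur.1 d (D, []) (pvDget gout cur) with ⟨A1, E1⟩
  rw [pvScan_snd sb cur.1 d (pvDget gout cur) D q, hsc]
  rw [pvScan_snd sb cur.1 d (pvDget gin cur) A1 (q ++ E1),
    pvScan_snd sb cur.1 d (pvDget gin cur) A1 E1]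
  simp [List.append_assoc]

lemma pvStep_get?_mono (gout gin : List (String × String × List (String × String))) (sb : Bool)
    (d : Int) (st : PySem.Dict (String × String) Int × List (String × String))
    (cur : String × String) (x : String × String) (v : Int) (h : st.1.get? x = some v) :
    (pvLevelStep gout gin sb d st cur).1.get? x = some v := by
  rcases st with ⟨D, q⟩
  rw [pvStep_eq]
  exact pvScan_get?_mono sb cur.1 d (pvDget gin cur) _ x v
    (pvScan_get?_mono sb cur.1 d (pvDget gout cur) (D, q) x v h)

lemma pvStep_inv (gout gin : List (String × String × List (String × String))) (sb : Bool)
    (d : Int) (st : PySem.Dict (String × String) Int × List (String × String))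
    (cur : String × String) (h : ∀ x ∈ st.2, st.1.get? x = some (d + 1)) :
    ∀ x ∈ (pvLevelStep gout gin sb d st cur).2,
      (pvLevelStep gout gin sb d st cur).1.get? x = some (d + 1) := by
  rcases st with ⟨D, q⟩
  rw [pvStep_eq]
  exact pvScan_inv sb cur.1 d (pvDget gin cur) _
    (pvScan_inv sb cur.1 d (pvDget gout cur) (D, q) h)

lemma pvLev_inv (gout gin : List (String × String × List (String × String))) (sb : Bool)
    (d : Int) :
    ∀ (F : List (String × String)) (st : PySem.Dict (String × String) Int × List (String × String)),
      (∀ x ∈ st.2, st.1.get? x = some (d + 1)) →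
      ∀ x ∈ (F.foldl (pvLevelStep gout gin sb d) st).2,
        (F.foldl (pvLevelStep gout gin sb d) st).1.get? x = some (d + 1) := by
  intro F
  induction F with
  | nil => intro st h; exact h
  | cons cur F ih =>
    intro st h
    simp only [List.foldl_cons]
    exact ih _ (pvStep_inv gout gin sb d st cur h)

lemma pvLoopA_skip (gout gin : List (String × String × List (String × String))) (maxd : Int)
    (sb : Bool) :
    ∀ (q : List (String × String)) (D : PySem.Dict (String × String) Int),
      (∀ x ∈ q, maxd ≤ (D.get? x).getD 0) → pvLoopA gout gin maxd sb D q = D := by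
  intro q
  induction q with
  | nil => intro D _; exact pvLoopA_nil ..
  | cons cur rest ih =>
    intro D h
    rw [pvLoopA_cons, if_pos (h cur (List.mem_cons_self ..))]
    exact ih D (fun x hx => h x (List.mem_cons_of_mem _ hx))

-- one whole BFS level: A's queue run over a depth-d frontier F (with the depth-(d+1) tail N
-- already behind it) equals the level fold over F followed by the queue run on the grown tail
lemma pvLoopA_level (gout gin : List (String × String × List (String × String))) (maxd : Int)
    (sb : Bool) (d : Int) (hd : d < maxd) :
    ∀ (F N : List (String × String)) (D : PySem.Dict (String × String) Int),
      (∀ x ∈ F, D.get? x = some d) → (∀ x ∈ N, D.get? x = some (d + 1)) →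
      pvLoopA gout gin maxd sb D (F ++ N)
        = pvLoopA gout gin maxd sb
            (F.foldl (pvLevelStep gout gin sb d) (D, ([] : List (String × String)))).1
            (N ++ (F.foldl (pvLevelStep gout gin sb d) (D, [])).2) := by
  intro F
  induction F with
  | nil => intro N D _ _; simp
  | cons cur F ih =>
    intro N D hF hN
    have hcur : D.get? cur = some d := hF cur (List.mem_cons_self ..)
    rw [List.cons_append, pvLoopA_cons]
    simp only [hcur, Option.getD_some]
    rw [if_neg (by omega : ¬ maxd ≤ d)]
    have hv : pvVisit gout gin sb D (F ++ N) cur d = pvLevelStep gout gin sb d (D, F ++ N) cur :=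
      (pvStep_eq gout gin sb d D (F ++ N) cur).symm
    rw [hv, pvStep_snd]
    have hF' : ∀ x ∈ F, (pvLevelStep gout gin sb d (D, []) cur).1.get? x = some d :=
      fun x hx => pvStep_get?_mono gout gin sb d (D, []) cur x d (hF x (List.mem_cons_of_mem _ hx))
    have hE : ∀ x ∈ (pvLevelStep gout gin sb d (D, []) cur).2,
        (pvLevelStep gout gin sb d (D, []) cur).1.get? x = some (d + 1) :=
      pvStep_inv gout gin sb d (D, []) cur (by simp)
    have hN' : ∀ x ∈ N ++ (pvLevelStep gout gin sb d (D, []) cur).2,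
        (pvLevelStep gout gin sb d (D, []) cur).1.get? x = some (d + 1) := by
      intro x hx
      rcases List.mem_append.mp hx with hx' | hx'
      · exact pvStep_get?_mono gout gin sb d (D, []) cur x (d + 1) (hN x hx')
      · exact hE x hx'
    rw [List.append_assoc, ih (N ++ (pvLevelStep gout gin sb d (D, []) cur).2)
      (pvLevelStep gout gin sb d (D, []) cur).1 hF' hN']
    simp only [List.foldl_cons]
    conv_rhs => rw [show pvLevelStep gout gin sb d (D, []) cur
        = ((pvLevelStep gout gin sb d (D, []) cur).1, (pvLevelStep gout gin sb d (D, []) cur).2)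
      from rfl]
    rw [pvFoldl_snd_append (pvLevelStep gout gin sb d) (pvStep_snd gout gin sb d) F
      (pvLevelStep gout gin sb d (D, []) cur).1 (pvLevelStep gout gin sb d (D, []) cur).2]
    simp [List.append_assoc]

-- the whole run: A's queue BFS = the level iteration over range(d, max_depth)
lemma pvLoopA_eq_levels (gout gin : List (String × String × List (String × String))) (maxd : Int)
    (sb : Bool) :
    ∀ (n : Nat) (d : Int) (D : PySem.Dict (String × String) Int) (F : List (String × String)),
      (maxd - d).toNat = n → (∀ x ∈ F, D.get? x = some d) →
      pvLoopA gout gin maxd sb D F = pvLevels gout gin sb n d D F := by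
  intro n
  induction n with
  | zero =>
    intro d D F hn hF
    simp only [pvLevels]
    exact pvLoopA_skip gout gin maxd sb F D
      (fun x hx => by rw [hF x hx]; simp; omega)
  | succ n ih =>
    intro d D F hn hF
    have hd : d < maxd := by omega
    by_cases hF0 : F = []
    · subst hF0
      simp [pvLevels, pvLoopA_nil]
    · simp only [pvLevels]
      rw [if_neg (by simpa [List.isEmpty_iff] using hF0)]
      have key := pvLoopA_level gout gin maxd sb d hd F [] D hF (by simp)
      simp only [List.append_nil, List.nil_append] at key
      rw [key]
      exact ih (d + 1) _ _ (by omega)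
        (pvLev_inv gout gin sb d F (D, []) (by simp))

lemma pvSeed_fold :
    ∀ (seeds : List (String × String)) (D : PySem.Dict (String × String) Int)
      (q : List (String × String)),
      seeds.foldl (fun st s => (st.1.insert s 0, st.2 ++ [s])) (D, q)
        = (seeds.foldl (fun dist s => dist.insert s 0) D, q ++ seeds) := by
  intro seeds
  induction seeds with
  | nil => intro D q; simp
  | cons s seeds ih =>
    intro D q
    simp only [List.foldl_cons]
    rw [ih]
    simp

lemma pvSeed_get? :
    ∀ (seeds : List (String × String)) (D : PySem.Dict (String × String) Int)
      (x : String × String),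
      (x ∈ seeds ∨ D.get? x = some 0) →
      (seeds.foldl (fun dist s => dist.insert s 0) D).get? x = some 0 := by
  intro seeds
  induction seeds with
  | nil =>
    intro D x h
    rcases h with h | h
    · cases h
    · simpa using h
  | cons s seeds ih =>
    intro D x h
    simp only [List.foldl_cons]
    apply ih
    rcases h with h | h
    · rcases List.mem_cons.mp h with rfl | h'
      · exact Or.inr (PySem.Dict.get?_insert_self D x 0)
      · exact Or.inl h'
    · by_cases hxs : x = s
      · subst hxs
        exact Or.inr (PySem.Dict.get?_insert_self D x 0)
      · exact Or.inr (by rw [PySem.Dict.get?_insert_of_ne D 0 hxs]; exact h)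

-- ---- part 2: the middle form equals B's round iteration ----

-- B's dict-only neighbour fold computes the first component of the pair fold
lemma pvRelax_eq_scan (sb : Bool) (cb : String) (d : Int) :
    ∀ (lst : List (String × String)) (D : PySem.Dict (String × String) Int)
      (q : List (String × String)),
      pvRelax sb cb d D lst = (pvScan sb cb d (D, q) lst).1 := by
  intro lst
  induction lst with
  | nil => intro D q; rfl
  | cons nxt rest ih =>
    intro D q
    have hstep : pvRelax sb cb d D (nxt :: rest)
        = pvRelax sb cb d
            (if ((!sb || nxt.1 == cb) && !D.contains nxt) = true then D.insert nxt (d + 1) else D)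
            rest := rfl
    by_cases h1 : sb ∧ nxt.1 ≠ cb
    · have hb : ((!sb || nxt.1 == cb) && !D.contains nxt) = false := by
        have : (nxt.1 == cb) = false := beq_eq_false_iff_ne.mpr h1.2
        simp [h1.1, this]
      rw [hstep, hb]
      simp only [pvScan, if_pos h1, if_neg (by simp : ¬ (false = true))]
      exact ih D q
    · have hb1 : (!sb || nxt.1 == cb) = true := by
        rcases not_and_or.mp h1 with h | h
        · have : sb = false := by revert h; cases sb <;> simp
          simp [this]
        · have : nxt.1 = cb := not_not.mp h
          simp [this]
      by_cases h2 : D.contains nxt = true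
      · have hb : ((!sb || nxt.1 == cb) && !D.contains nxt) = false := by simp [h2]
        rw [hstep, hb]
        simp only [pvScan, if_neg h1, if_pos h2, if_neg (by simp : ¬ (false = true))]
        exact ih D q
      · have hb : ((!sb || nxt.1 == cb) && !D.contains nxt) = true := by
          simp [hb1, h2]
        rw [hstep, hb]
        simp only [pvScan, if_neg h1, if_neg h2, if_pos rfl]
        exact ih _ _

lemma pvRoundStep_eq (gout gin : List (String × String × List (String × String))) (sb : Bool)
    (d : Int) (D : PySem.Dict (String × String) Int) (q : List (String × String))
    (cur : String × String) :
    pvRoundStep gout gin sb d D cur = (pvLevelStep gout gin sb d (D, q) cur).1 := by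
  rw [pvLevelStep, pvFoldNbrs_eq_scan, pvScan_append, pvRoundStep,
    pvRelax_eq_scan sb cur.1 d (pvDget gout cur ++ pvDget gin cur) D q, pvScan_append]

lemma pvRoundFold_eq (gout gin : List (String × String × List (String × String))) (sb : Bool)
    (d : Int) :
    ∀ (F : List (String × String)) (D : PySem.Dict (String × String) Int)
      (q : List (String × String)),
      F.foldl (pvRoundStep gout gin sb d) D = (F.foldl (pvLevelStep gout gin sb d) (D, q)).1 := by
  intro F
  induction F with
  | nil => intro D q; rfl
  | cons cur F ih =>
    intro D q
    simp only [List.foldl_cons]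
    rw [pvRoundStep_eq gout gin sb d D q cur]
    rw [ih (pvLevelStep gout gin sb d (D, q) cur).1 (pvLevelStep gout gin sb d (D, q) cur).2]

-- the items of the dict after one neighbour scan: the old items plus the new frontier at d+1
lemma pvScan_items (sb : Bool) (cb : String) (d : Int) :
    ∀ (lst : List (String × String)) (D : PySem.Dict (String × String) Int),
      (pvScan sb cb d (D, []) lst).1.items
        = D.items ++ (pvScan sb cb d (D, []) lst).2.map (fun x => (x, d + 1)) := by
  intro lst
  induction lst with
  | nil => intro D; simp [pvScan]
  | cons nxt rest ih =>
    intro D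
    by_cases h1 : sb ∧ nxt.1 ≠ cb
    · simp only [pvScan, if_pos h1]; exact ih D
    · by_cases h2 : D.contains nxt = true
      · simp only [pvScan, if_neg h1, if_pos h2]; exact ih D
      · simp only [pvScan, if_neg h1, if_neg h2]
        rw [pvScan_snd sb cb d rest (D.insert nxt (d + 1)) ([] ++ [nxt])]
        have hins := PySem.Dict.items_insert_of_not_contains D (d + 1) (by simpa using h2)
        simp only [List.nil_append]
        rw [ih (D.insert nxt (d + 1)), hins]
        simp [List.append_assoc]

lemma pvStep_items (gout gin : List (String × String × List (String × String))) (sb : Bool)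
    (d : Int) (D : PySem.Dict (String × String) Int) (cur : String × String) :
    (pvLevelStep gout gin sb d (D, []) cur).1.items
      = D.items ++ (pvLevelStep gout gin sb d (D, []) cur).2.map (fun x => (x, d + 1)) := by
  rw [pvStep_eq]
  simp only [pvVisit]
  rcases hsc : pvScan sb cur.1 d (D, []) (pvDget gout cur) with ⟨A1, E1⟩
  have h1 : A1.items = D.items ++ E1.map (fun x => (x, d + 1)) := by
    have := pvScan_items sb cur.1 d (pvDget gout cur) D
    rw [hsc] at this
    exact this
  rw [pvScan_snd sb cur.1 d (pvDget gin cur) A1 E1]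
  simp only
  rw [pvScan_items sb cur.1 d (pvDget gin cur) A1, h1]
  simp [List.append_assoc]

lemma pvLev_items (gout gin : List (String × String × List (String × String))) (sb : Bool)
    (d : Int) :
    ∀ (F : List (String × String)) (D : PySem.Dict (String × String) Int),
      (F.foldl (pvLevelStep gout gin sb d) (D, [])).1.items
        = D.items ++ (F.foldl (pvLevelStep gout gin sb d) (D, [])).2.map (fun x => (x, d + 1)) := by
  intro F
  induction F with
  | nil => intro D; simp
  | cons cur F ih =>
    intro D
    simp only [List.foldl_cons]
    rcases hst : pvLevelStep gout gin sb d (D, []) cur with ⟨D1, q1⟩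
    have h1 : D1.items = D.items ++ q1.map (fun x => (x, d + 1)) := by
      have := pvStep_items gout gin sb d D cur
      rw [hst] at this
      exact this
    rw [pvFoldl_snd_append (pvLevelStep gout gin sb d) (pvStep_snd gout gin sb d) F D1 q1]
    simp only
    rw [ih D1, h1]
    simp [List.append_assoc]

-- with all stored distances ≤ d, the items carrying exactly d determine the frontier,
-- and the middle form coincides with B's rounds
lemma pvLevels_eq_rounds (gout gin : List (String × String × List (String × String))) (sb : Bool) :
    ∀ (n : Nat) (d : Int) (D : PySem.Dict (String × String) Int) (F : List (String × String)),
      F = (D.items.filter (fun p => p.2 == d)).map (·.1) →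
      (∀ p ∈ D.items, p.2 ≤ d) →
      pvLevels gout gin sb n d D F = pvRounds gout gin sb n d D := by
  intro n
  induction n with
  | zero => intro d D F _ _; rfl
  | succ n ih =>
    intro d D F hF hle
    simp only [pvLevels, pvRounds]
    rw [← hF]
    by_cases hF0 : F.isEmpty
    · rw [if_pos hF0, if_pos hF0]
    · rw [if_neg hF0, if_neg hF0]
      rcases hst : F.foldl (pvLevelStep gout gin sb d) (D, []) with ⟨D', F'⟩
      have hitems : D'.items = D.items ++ F'.map (fun x => (x, d + 1)) := by
        have := pvLev_items gout gin sb d F D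
        rw [hst] at this
        exact this
      have hfold : F.foldl (pvRoundStep gout gin sb d) D = D' := by
        rw [pvRoundFold_eq gout gin sb d F D [], hst]
      rw [hfold]
      apply ih (d + 1) D' F'
      · rw [hitems]
        rw [List.filter_append, List.map_append]
        have hold : D.items.filter (fun p => p.2 == d + 1) = [] := by
          apply List.filter_eq_nil_iff.mpr
          intro p hp
          have := hle p hp
          simp only [beq_iff_eq]
          omega
        have hnew : (F'.map (fun x => (x, d + 1))).filter (fun p => p.2 == d + 1)
            = F'.map (fun x => (x, d + 1)) := by
          apply List.filter_eq_self.mpr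
          intro p hp
          obtain ⟨x, _, rfl⟩ := List.mem_map.mp hp
          simp
        rw [hold, hnew]
        simp [Function.comp_def]
      · intro p hp
        rw [hitems] at hp
        rcases List.mem_append.mp hp with hp' | hp'
        · have := hle p hp'
          omega
        · obtain ⟨x, _, rfl⟩ := List.mem_map.mp hp'
          simp

-- ---- part 3: level 0 — duplicate seeds are no-ops, and the dict keys are the deduped seeds ----

-- "cur is fully expanded in D": every neighbour passing the filter is already a key
def pvExp (gout gin : List (String × String × List (String × String))) (sb : Bool)
    (D : PySem.Dict (String × String) Int) (cur : String × String) : Prop :=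
  ∀ nxt ∈ pvDget gout cur ++ pvDget gin cur, (sb ∧ nxt.1 ≠ cur.1) ∨ D.contains nxt = true

lemma pvScan_contains_mono (sb : Bool) (cb : String) (d : Int) :
    ∀ (lst : List (String × String)) st (x : String × String),
      st.1.contains x = true → (pvScan sb cb d st lst).1.contains x = true := by
  intro lst
  induction lst with
  | nil => intro st x h; simpa [pvScan] using h
  | cons nxt rest ih =>
    intro st x h
    by_cases h1 : sb ∧ nxt.1 ≠ cb
    · simp only [pvScan, if_pos h1]; exact ih st x h
    · by_cases h2 : st.1.contains nxt = true
      · simp only [pvScan, if_neg h1, if_pos h2]; exact ih st x h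
      · simp only [pvScan, if_neg h1, if_neg h2]
        apply ih _ x
        rw [PySem.Dict.contains_insert]
        simp [h]

lemma pvScan_id (sb : Bool) (cb : String) (d : Int) :
    ∀ (lst : List (String × String)) st,
      (∀ x ∈ lst, (sb ∧ x.1 ≠ cb) ∨ st.1.contains x = true) →
      pvScan sb cb d st lst = st := by
  intro lst
  induction lst with
  | nil => intro st _; rfl
  | cons nxt rest ih =>
    intro st h
    have hrest : ∀ x ∈ rest, (sb ∧ x.1 ≠ cb) ∨ st.1.contains x = true :=
      fun x hx => h x (List.mem_cons_of_mem _ hx)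
    rcases h nxt (List.mem_cons_self ..) with h1 | h1
    · simp only [pvScan, if_pos h1]; exact ih st hrest
    · by_cases hf : sb ∧ nxt.1 ≠ cb
      · simp only [pvScan, if_pos hf]; exact ih st hrest
      · simp only [pvScan, if_neg hf, if_pos h1]; exact ih st hrest

lemma pvScan_contains_all (sb : Bool) (cb : String) (d : Int) :
    ∀ (lst : List (String × String)) st (x : String × String), x ∈ lst →
      ¬ (sb ∧ x.1 ≠ cb) → (pvScan sb cb d st lst).1.contains x = true := by
  intro lst
  induction lst with
  | nil => intro st x hx; cases hx
  | cons nxt rest ih =>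
    intro st x hx hfx
    rcases List.mem_cons.mp hx with rfl | hx'
    · by_cases h2 : st.1.contains x = true
      · simp only [pvScan, if_neg hfx, if_pos h2]
        exact pvScan_contains_mono sb cb d rest st x h2
      · simp only [pvScan, if_neg hfx, if_neg h2]
        apply pvScan_contains_mono
        exact PySem.Dict.contains_insert_self ..
    · by_cases h1 : sb ∧ nxt.1 ≠ cb
      · simp only [pvScan, if_pos h1]; exact ih st x hx' hfx
      · by_cases h2 : st.1.contains nxt = true
        · simp only [pvScan, if_neg h1, if_pos h2]; exact ih st x hx' hfx
        · simp only [pvScan, if_neg h1, if_neg h2]; exact ih _ x hx' hfx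

lemma pvStep_contains_mono (gout gin : List (String × String × List (String × String))) (sb : Bool)
    (d : Int) (st : PySem.Dict (String × String) Int × List (String × String))
    (cur x : String × String) (h : st.1.contains x = true) :
    (pvLevelStep gout gin sb d st cur).1.contains x = true := by
  rcases st with ⟨D, q⟩
  rw [pvStep_eq]
  exact pvScan_contains_mono sb cur.1 d (pvDget gin cur) _ x
    (pvScan_contains_mono sb cur.1 d (pvDget gout cur) (D, q) x h)

lemma pvStep_id (gout gin : List (String × String × List (String × String))) (sb : Bool)
    (d : Int) (st : PySem.Dict (String × String) Int × List (String × String))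
    (cur : String × String) (h : pvExp gout gin sb st.1 cur) :
    pvLevelStep gout gin sb d st cur = st := by
  rcases st with ⟨D, q⟩
  rw [pvStep_eq, pvVisit]
  have h1 : pvScan sb cur.1 d (D, q) (pvDget gout cur) = (D, q) :=
    pvScan_id sb cur.1 d (pvDget gout cur) (D, q)
      (fun x hx => h x (List.mem_append_left _ hx))
  rw [h1]
  exact pvScan_id sb cur.1 d (pvDget gin cur) (D, q)
    (fun x hx => h x (List.mem_append_right _ hx))

lemma pvStep_exp (gout gin : List (String × String × List (String × String))) (sb : Bool)
    (d : Int) (st : PySem.Dict (String × String) Int × List (String × String))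
    (cur : String × String) :
    pvExp gout gin sb (pvLevelStep gout gin sb d st cur).1 cur := by
  rcases st with ⟨D, q⟩
  intro nxt hn
  by_cases hf : sb ∧ nxt.1 ≠ cur.1
  · exact Or.inl hf
  · right
    rw [pvStep_eq]
    simp only [pvVisit]
    rcases List.mem_append.mp hn with hn' | hn'
    · exact pvScan_contains_mono sb cur.1 d (pvDget gin cur) _ nxt
        (pvScan_contains_all sb cur.1 d (pvDget gout cur) (D, q) nxt hn' hf)
    · exact pvScan_contains_all sb cur.1 d (pvDget gin cur) _ nxt hn' hf

-- first-occurrence dedup against a seen-list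
def pvDedup (seen : List (String × String)) : List (String × String) → List (String × String)
  | [] => []
  | c :: F => if seen.contains c then pvDedup seen F else c :: pvDedup (c :: seen) F

-- duplicates in the fold are no-ops: the fold equals the fold over the deduped list
lemma pvFold_dedup (gout gin : List (String × String × List (String × String))) (sb : Bool)
    (d : Int) :
    ∀ (F seen : List (String × String))
      (st : PySem.Dict (String × String) Int × List (String × String)),
      (∀ c ∈ seen, pvExp gout gin sb st.1 c) →
      F.foldl (pvLevelStep gout gin sb d) st
        = (pvDedup seen F).foldl (pvLevelStep gout gin sb d) st := by
  intro F
  induction F with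
  | nil => intro seen st _; rfl
  | cons c F ih =>
    intro seen st hseen
    by_cases hc : seen.contains c
    · have hcm : c ∈ seen := by simpa using hc
      simp only [pvDedup, if_pos hc, List.foldl_cons]
      rw [pvStep_id gout gin sb d st c (hseen c hcm)]
      exact ih seen st hseen
    · simp only [pvDedup, if_neg hc, List.foldl_cons]
      apply ih (c :: seen)
      intro c' hc'
      rcases List.mem_cons.mp hc' with rfl | hc''
      · exact pvStep_exp gout gin sb d st c'
      · intro nxt hn
        rcases hseen c' hc'' nxt hn with h | h
        · exact Or.inl h
        · exact Or.inr (pvStep_contains_mono gout gin sb d st c nxt h)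

-- the keys of the seed dict are the seeds deduped by first occurrence
lemma pvSeed_keys :
    ∀ (seeds : List (String × String)) (D : PySem.Dict (String × String) Int)
      (seen : List (String × String)),
      (∀ x, D.contains x = seen.contains x) →
      ((seeds.foldl (fun dist s => dist.insert s 0) D).items).map (·.1)
        = D.items.map (·.1) ++ pvDedup seen seeds := by
  intro seeds
  induction seeds with
  | nil => intro D seen _; simp [pvDedup]
  | cons s seeds ih =>
    intro D seen hsim
    simp only [List.foldl_cons]
    by_cases hc : D.contains s = true
    · have hcs : seen.contains s = true := by rw [← hsim]; exact hc
      simp only [pvDedup, hcs, if_pos rfl]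
      rw [ih (D.insert s 0) seen]
      · congr 1
        have : (D.insert s 0).items.map (·.1) = (D.insert s 0).keys := rfl
        rw [this, PySem.Dict.keys_insert_of_contains D 0 hc]
        rfl
      · intro x
        rw [PySem.Dict.contains_insert, hsim]
        by_cases hxs : (x == s) = true
        · have hx : x = s := by simpa using hxs
          rw [hxs, Bool.true_or, hx, hcs]
        · have hxs' : (x == s) = false := by revert hxs; cases (x == s) <;> simp
          rw [hxs', Bool.false_or]
    · have hcf : D.contains s = false := by revert hc; cases (D.contains s) <;> simp
      have hcs : seen.contains s = false := by rw [← hsim]; exact hcf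
      simp only [pvDedup, hcs]
      rw [if_neg (by decide : ¬ (false = true))]
      rw [ih (D.insert s 0) (s :: seen)]
      · have : (D.insert s 0).items.map (·.1) = (D.insert s 0).keys := rfl
        rw [this, PySem.Dict.keys_insert_of_not_contains D 0 hcf]
        show (D.items.map (·.1)) ++ [s] ++ _ = _
        simp [List.append_assoc]
      · intro x
        rw [PySem.Dict.contains_insert, hsim]
        simp only [List.contains_cons]
    
lemma pvSeed_values :
    ∀ (seeds : List (String × String)) (D : PySem.Dict (String × String) Int),
      (∀ p ∈ D.items, p.2 = 0) →
      ∀ p ∈ (seeds.foldl (fun dist s => dist.insert s 0) D).items, p.2 = 0 := by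
  intro seeds
  induction seeds with
  | nil => intro D h; simpa using h
  | cons s seeds ih =>
    intro D h
    simp only [List.foldl_cons]
    apply ih
    intro p hp
    rcases (PySem.Dict.mem_items_insert ..).mp hp with rfl | ⟨hp', _⟩
    · rfl
    · exact h p hp'

-- ===== VERDICT (by name: the statement is the Claim_ definition above) =====
theorem bfs_neighbors_spec : Claim_equal_bfs_neighbors := by
  intro gout gin seeds maxd sb _
  unfold Spec_bfs_neighbors bfs_neighbors bfs_neighbors_alt
  rw [pvSeed_fold seeds PySem.Dict.empty []]
  simp only [List.nil_append]
  set dist0 := seeds.foldl (fun dist s => dist.insert s 0)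
    (PySem.Dict.empty : PySem.Dict (String × String) Int) with hdist0
  have hvals : ∀ p ∈ dist0.items, p.2 = 0 := by
    apply pvSeed_values
    intro p hp
    simp [PySem.Dict.empty] at hp
  have hkeys : dist0.items.map (·.1) = pvDedup [] seeds := by
    have := pvSeed_keys seeds PySem.Dict.empty []
      (by intro x; simp [PySem.Dict.contains_empty])
    simpa [PySem.Dict.empty] using this
  have hK : (dist0.items.filter (fun p => p.2 == (0 : Int))).map (·.1) = pvDedup [] seeds := by
    rw [List.filter_eq_self.mpr (by intro p hp; simp [hvals p hp]), hkeys]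
  congr 1
  -- A's run = level iteration on seeds
  rw [pvLoopA_eq_levels gout gin maxd sb maxd.toNat 0 dist0 seeds (by simp)
    (fun x hx => pvSeed_get? seeds PySem.Dict.empty x (Or.inl hx))]
  -- level iteration on seeds = level iteration on the deduped seeds = B's rounds
  rw [← pvLevels_eq_rounds gout gin sb maxd.toNat 0 dist0
    ((dist0.items.filter (fun p => p.2 == (0 : Int))).map (·.1)) rfl
    (fun p hp => by rw [hvals p hp])]
  rw [hK]
  -- remains: pvLevels … seeds = pvLevels … (pvDedup [] seeds)
  cases hn : maxd.toNat with
  | zero => rfl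
  | succ n =>
    simp only [pvLevels]
    have hempty : seeds.isEmpty = (pvDedup [] seeds).isEmpty := by
      cases seeds with
      | nil => rfl
      | cons s ss => simp [pvDedup]
    rw [hempty]
    by_cases h0 : (pvDedup [] seeds).isEmpty
    · rw [if_pos h0, if_pos h0]
    · rw [if_neg h0, if_neg h0]
      rw [pvFold_dedup gout gin sb 0 seeds [] (dist0, []) (by intro c hc; cases hc)]
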